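-- pv_equiv track=rewrite | github.com/pypi-data/pypi-mirror-232 | packages/dicergirl/dicergirl-3.4.0b3.tar.gz/dicergirl-3.4.0b3/dicergirl/handlers/general.py | __set_plus_format
-- ===== SOURCE A (Python) =====
-- def __set_plus_format(args: list):
--     """ `.set 技能 +x`语法解析 """
--     while True:
--         try:
--             index = args.index("+")
--         except:
--             break
--         args[index] = args[index] + args[index+1]
--         args.pop(index+1)
--
--     while True:
--         try:
--             index = args.index("-")
--         except:
--             break
--         args[index] = args[index] + args[index+1]
--         args.pop(index+1)
--
--     return args
-- ===== SOURCE B (Python) =====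
-- # B: one left-to-right pass per sign building a new list, instead of repeated
-- # .index scans with in-place pops.  Mutates args in place (args[:] = result)
-- # and returns it, like the original.
-- def __set_plus_format(args: list):
--     """ `.set 技能 +x`语法解析 """
--     def merge(tokens, sign):
--         out = []
--         i = 0
--         while i < len(tokens):
--             if tokens[i] == sign:
--                 out.append(sign + tokens[i + 1])
--                 i += 2
--             else:
--                 out.append(tokens[i])
--                 i += 1
--         return out
--
--     args[:] = merge(merge(args, "+"), "-")
--     return args
-- ===== Notes on version B (the rewrite author's own statement) =====
-- stated objective: alternative
-- what changed: Replaced the repeated 'args.index(sign)' rescans with in-place merge+pop by a single left-to-right pass per sign that builds the result list once (O(n) passes vs A's O(n^2) worst case, though not measurably faster since .index runs in C); Pre_ restricts to the natural domain of tokenised arguments (no empty-string tokens, and the list does not end in a bare '+'/'-', on which both raise IndexError): empty tokens cannot arise from splitting a command line and whether a sign merges across them is unspecified (A's rescan cascades over them, B does not).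
-- outside the precondition, e.g. on __set_plus_format(['+', '', '5']): A returns ['+5'], B returns ['+', '5']; on __set_plus_format(['a', '']): A returns ['a', ''], B returns ['a', '']; on __set_plus_format(['x', '+']): A raises IndexError, B raises IndexError
import Mathlib
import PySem

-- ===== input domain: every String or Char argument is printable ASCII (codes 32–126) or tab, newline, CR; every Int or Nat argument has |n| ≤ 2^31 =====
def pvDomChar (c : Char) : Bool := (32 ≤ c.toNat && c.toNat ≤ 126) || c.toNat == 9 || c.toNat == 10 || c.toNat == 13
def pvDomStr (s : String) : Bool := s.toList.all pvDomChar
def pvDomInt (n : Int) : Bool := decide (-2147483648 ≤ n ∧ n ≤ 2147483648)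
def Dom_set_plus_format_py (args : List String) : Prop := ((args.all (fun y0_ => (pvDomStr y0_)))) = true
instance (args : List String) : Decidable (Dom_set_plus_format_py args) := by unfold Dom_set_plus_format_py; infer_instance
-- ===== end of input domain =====

-- B replaces A's repeated leftmost .index scans + in-place pops with one left-to-right
-- pass per sign that builds a new list; both mutate args in place and return that list,
-- so return-value equivalence covers the observable effect.

-- ===== PORT A =====
-- one 'while True: index = args.index(sign); merge; pop' loop of A
def mergeLoopA (sign : String) (args : List String) : List String :=
  match PySem.List.index? args sign with
  | none => args                                   -- 'except: break'
  | some i =>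
    match PySem.List.pyGet? args ((i : Int) + 1) with
    | none => args                                 -- Python raises IndexError here (outside Pre_)
    | some nxt =>
      match PySem.List.pyGet? args (i : Int) with
      | none => args                               -- unreachable: i is a valid index
      | some cur =>
        let args1 := PySem.List.pySetD args (i : Int) (cur ++ nxt)   -- args[index] = args[index] + args[index+1]
        match h : PySem.List.pop? args1 ((i : Int) + 1) with          -- args.pop(index+1)
        | none => args1                            -- unreachable given nxt exists
        | some r => mergeLoopA sign r.2
  termination_by args.length
  decreasing_by
    have h1 := PySem.List.length_of_pop?_eq_some _ h
    have h2 : args1.length = args.length := PySem.List.length_pySetD args _ _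
    omega

def set_plus_format_py (args : List String) : List String :=
  mergeLoopA "-" (mergeLoopA "+" args)

-- ===== PORT B =====
-- one 'while i < len(tokens)' pass of B building 'out'
def mergePassB (sign : String) : List String → List String
  | [] => []
  | t :: rest =>
    if t = sign then
      match rest with
      | [] => []                                   -- Python raises IndexError here (outside Pre_)
      | x :: r => (sign ++ x) :: mergePassB sign r
    else t :: mergePassB sign rest

def set_plus_format_py_alt (args : List String) : List String :=
  mergePassB "-" (mergePassB "+" args)

-- ===== PRECONDITION & SPEC =====
-- Pre_ restricts to the natural domain of tokenised command arguments: no empty-string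
-- tokens (they cannot arise from splitting a command line, and whether a sign merges
-- across them is unspecified — A's restart-from-scratch scan cascades over them, B does
-- not), and the list does not end in a bare '+'/'-' (there both A and B raise IndexError).
def Pre_set_plus_format_py (args : List String) : Prop :=
  "" ∉ args ∧ args.getLast? ≠ some "+" ∧ args.getLast? ≠ some "-"
instance (args : List String) : Decidable (Pre_set_plus_format_py args) := by
  unfold Pre_set_plus_format_py; infer_instance

def pvWitness_set_plus_format_py : List String := ["skill", "+", "5", "-", "3x"]

def Spec_set_plus_format_py (args : List String) (out : List String) : Prop := out = set_plus_format_py_alt args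
instance (args : List String) (out : List String) : Decidable (Spec_set_plus_format_py args out) := by unfold Spec_set_plus_format_py; infer_instance

-- ===== CLAIM (what is proved, stated in full; the proofs are below) =====
def Claim_equal_set_plus_format_py : Prop := ∀ (args : List String), Dom_set_plus_format_py args → Pre_set_plus_format_py args → Spec_set_plus_format_py args (set_plus_format_py args)

-- ===== LEMMAS AND PROOFS =====

-- string facts used below
theorem str_append_ne_self {s x : String} (hx : x ≠ "") : s ++ x ≠ s := by
  intro h; exact hx (by have := congrArg String.length h; simpa using this)

theorem str_append_ne_empty {s : String} (x : String) (hs : s ≠ "") : s ++ x ≠ "" := by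
  intro h
  have := congrArg String.length h; simp at this
  exact hs this.1

theorem plus_append_ne_minus (x : String) : ("+" ++ x) ≠ "-" := by
  intro h; have := congrArg String.toList h; simp [String.toList_append] at this

-- A's loop walks past a leading non-sign element untouched
theorem mergeLoopA_cons_skip (sign t : String) (ht : t ≠ sign) :
    ∀ (n : Nat) (rest : List String), rest.length ≤ n →
    mergeLoopA sign (t :: rest) = t :: mergeLoopA sign rest := by
  intro n
  induction n with
  | zero =>
    intro rest hn
    have : rest = [] := List.length_eq_zero_iff.mp (Nat.le_zero.mp hn)
    subst this
    rw [mergeLoopA.eq_def, mergeLoopA.eq_def]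
    simp only [PySem.List.index?]
    split <;> rfl
  | succ n ih =>
    intro rest hn
    rw [mergeLoopA.eq_def, mergeLoopA.eq_def]
    rw [PySem.List.index?_cons_of_ne _ ht]
    cases hidx : PySem.List.index? rest sign with
    | none => simp
    | some i =>
      simp only [Option.map_some]
      push_cast
      cases hget : PySem.List.pyGet? rest ((i : Int) + 1) with
      | none =>
        have hc : PySem.List.pyGet? (t :: rest) ((i : Int) + 1 + 1) = none := by
          rw [show ((i : Int) + 1 + 1) = (((i + 1 : Nat) : Int)) + 1 by push_cast; ring,
            PySem.List.pyGet?_cons_succ]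
          push_cast
          exact hget
        rw [hc]
      | some nxt =>
        have hgetc : PySem.List.pyGet? (t :: rest) ((i : Int) + 1 + 1) = some nxt := by
          rw [show ((i : Int) + 1 + 1) = (((i + 1 : Nat) : Int)) + 1 by push_cast; ring,
            PySem.List.pyGet?_cons_succ]
          push_cast
          exact hget
        have hbound : i + 1 < rest.length := by
          have h5 := hget
          rw [show ((i : Nat) : Int) + 1 = ((i + 1 : Nat) : Int) by push_cast; ring,
            PySem.List.pyGet?_natCast] at h5
          exact (List.getElem?_eq_some_iff.mp h5).1
        have hibound : i < rest.length := by omega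
        have hcur : PySem.List.pyGet? rest ((i : Nat) : Int) = some rest[i] := by
          rw [PySem.List.pyGet?_natCast]; exact List.getElem?_eq_getElem hibound
        have hcurc : PySem.List.pyGet? (t :: rest) ((i : Int) + 1) = some rest[i] := by
          rw [PySem.List.pyGet?_cons_succ]
          exact hcur
        rw [hgetc, hcurc, hcur]
        simp only
        have hsetc : PySem.List.pySetD (t :: rest) ((i : Int) + 1) (rest[i] ++ nxt)
            = t :: rest.set i (rest[i] ++ nxt) := by
          rw [show ((i : Int) + 1) = ((i + 1 : Nat) : Int) by push_cast; ring,
            PySem.List.pySetD_natCast]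
          rfl
        have hset : PySem.List.pySetD rest ((i : Nat) : Int) (rest[i] ++ nxt)
            = rest.set i (rest[i] ++ nxt) := PySem.List.pySetD_natCast _ _ _
        rw [hsetc, hset]
        set S := rest.set i (rest[i] ++ nxt) with hS
        have hSlen : S.length = rest.length := by simp [hS]
        have hpopc : PySem.List.pop? (t :: S) ((i : Int) + 1 + 1)
            = some ((t :: S)[i + 2]'(by simp [hSlen]; omega), t :: S.eraseIdx (i + 1)) := by
          rw [show ((i : Int) + 1 + 1) = ((i + 2 : Nat) : Int) by push_cast; ring]
          rw [PySem.List.pop?_natCast (t :: S) (i + 2) (by simp [hSlen]; omega)]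
          simp
        have hpop : PySem.List.pop? S ((i : Int) + 1)
            = some (S[i + 1]'(by omega), S.eraseIdx (i + 1)) := by
          rw [show ((i : Int) + 1) = ((i + 1 : Nat) : Int) by push_cast; ring]
          rw [PySem.List.pop?_natCast S (i + 1) (by omega)]
        rw [hpopc, hpop]
        simp only
        exact ih (S.eraseIdx (i + 1)) (by rw [List.length_eraseIdx_of_lt (by omega)]; omega)

-- getLast? walks past a cons with a non-empty tail
theorem getLast?_cons_ne {t : String} {l : List String} (h : l ≠ []) :
    (t :: l).getLast? = l.getLast? := by
  cases l with
  | nil => exact absurd rfl h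
  | cons a r => simp [List.getLast?_cons_cons]

-- A's loop on a leading sign absorbing a non-empty token
theorem mergeLoopA_sign_absorb (sign x : String) (r : List String) (hx : x ≠ "") :
    mergeLoopA sign (sign :: x :: r) = (sign ++ x) :: mergeLoopA sign r := by
  conv_lhs => rw [mergeLoopA.eq_def]
  simp only [PySem.List.index?_cons_self, Nat.cast_zero, zero_add]
  have h1 : PySem.List.pyGet? (sign :: x :: r) 1 = some x := by
    rw [← Nat.cast_one, PySem.List.pyGet?_natCast]; rfl
  have h0 : PySem.List.pyGet? (sign :: x :: r) 0 = some sign := by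
    rw [PySem.List.pyGet?_zero]; rfl
  rw [h1, h0]
  simp only
  have hpop : PySem.List.pop? (PySem.List.pySetD (sign :: x :: r) ((0 : Nat) : Int) (sign ++ x))
      (((0 : Nat) : Int) + 1) = some (x, (sign ++ x) :: r) := by
    rw [PySem.List.pySetD_natCast]
    simp only [List.set_cons_zero, Nat.cast_zero, zero_add]
    rw [← Nat.cast_one, PySem.List.pop?_natCast _ 1 (by simp)]
    simp
  rw [hpop]
  simp only
  exact mergeLoopA_cons_skip sign (sign ++ x) (str_append_ne_self hx) r.length r (le_refl _)

-- B's pass, unfolded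
theorem mergePassB_nil (sign : String) : mergePassB sign [] = [] := rfl

theorem mergePassB_cons_ne (sign t : String) (rest : List String) (ht : t ≠ sign) :
    mergePassB sign (t :: rest) = t :: mergePassB sign rest := by
  rw [mergePassB.eq_def]
  simp only [if_neg ht]

theorem mergePassB_sign_absorb (sign x : String) (r : List String) :
    mergePassB sign (sign :: x :: r) = (sign ++ x) :: mergePassB sign r := by
  rw [mergePassB.eq_def]
  simp

-- the main per-pass equivalence: on a list with no empty token whose last element is
-- not the sign, A's repeated .index loop equals B's single pass
theorem pass_eq (sign : String) :
    ∀ (n : Nat) (l : List String), l.length ≤ n → "" ∉ l → l.getLast? ≠ some sign →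
    mergeLoopA sign l = mergePassB sign l := by
  intro n
  induction n with
  | zero =>
    intro l hn _ _
    have : l = [] := List.length_eq_zero_iff.mp (Nat.le_zero.mp hn)
    subst this
    rw [mergeLoopA.eq_def, mergePassB_nil]
    simp [PySem.List.index?]
  | succ n ih =>
    intro l hn hmem hlast
    match l with
    | [] =>
      rw [mergeLoopA.eq_def, mergePassB_nil]
      simp [PySem.List.index?]
    | t :: rest =>
      by_cases ht : t = sign
      · subst ht
        match rest with
        | [] => simp at hlast
        | x :: r =>
          have hx : x ≠ "" := fun h => hmem (by simp [h])
          rw [mergeLoopA_sign_absorb t x r hx, mergePassB_sign_absorb t x r]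
          congr 1
          refine ih r (by simp at hn ⊢; omega) (fun h => hmem (by simp [h])) ?_
          match r with
          | [] => simp
          | z :: r' => simpa [List.getLast?_cons_cons] using hlast
      · rw [mergeLoopA_cons_skip sign t ht rest.length rest (le_refl _),
          mergePassB_cons_ne sign t rest ht]
        congr 1
        refine ih rest (by simp at hn ⊢; omega) (fun h => hmem (by simp [h])) ?_
        match rest with
        | [] => simp
        | z :: r' => simpa [List.getLast?_cons_cons] using hlast

-- the "+"-pass keeps the list free of empty tokens, nonempty, and its last ≠ "-"
theorem passB_plus_props :
    ∀ (n : Nat) (l : List String), l.length ≤ n → l ≠ [] → "" ∉ l →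
    l.getLast? ≠ some "+" → l.getLast? ≠ some "-" →
    mergePassB "+" l ≠ [] ∧ "" ∉ mergePassB "+" l ∧
      (mergePassB "+" l).getLast? ≠ some "-" := by
  intro n
  induction n with
  | zero =>
    intro l hn hne
    exact absurd (List.length_eq_zero_iff.mp (Nat.le_zero.mp hn)) hne
  | succ n ih =>
    intro l hn hne hmem h1 h2
    match l with
    | [t] =>
      simp at h1 h2
      rw [mergePassB_cons_ne _ _ _ h1, mergePassB_nil]
      refine ⟨by simp, ?_, by simpa using h2⟩
      simpa using fun h => hmem (by simp [h])
    | t :: z :: rest =>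
      by_cases ht : t = "+"
      · subst ht
        rw [mergePassB_sign_absorb "+" z rest]
        have hplus_ne : ("+" ++ z) ≠ "" := str_append_ne_empty z (by decide)
        match rest with
        | [] =>
          refine ⟨by simp, ?_, ?_⟩
          · simpa [mergePassB_nil] using Ne.symm hplus_ne
          · simp [mergePassB_nil, plus_append_ne_minus z]
        | w :: r =>
          have hrec := ih (w :: r) (by simp at hn ⊢; omega) (by simp)
            (fun h => hmem (by simp at h ⊢; tauto))
            (by simpa [List.getLast?_cons_cons] using h1)
            (by simpa [List.getLast?_cons_cons] using h2)
          obtain ⟨hne', hm', hl'⟩ := hrec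
          refine ⟨by simp, ?_, ?_⟩
          · intro h
            rcases List.mem_cons.mp h with h | h
            · exact hplus_ne h.symm
            · exact hm' h
          · rwa [getLast?_cons_ne hne']
      · rw [mergePassB_cons_ne _ _ _ ht]
        have hrec := ih (z :: rest) (by simp at hn ⊢; omega) (by simp)
          (fun h => hmem (by simp at h ⊢; tauto))
          (by simpa [List.getLast?_cons_cons] using h1)
          (by simpa [List.getLast?_cons_cons] using h2)
        obtain ⟨hne', hm', hl'⟩ := hrec
        refine ⟨by simp, ?_, ?_⟩
        · intro h
          rcases List.mem_cons.mp h with h | h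
          · exact hmem (by simp [h])
          · exact hm' h
        · rwa [getLast?_cons_ne hne']

-- ===== VERDICT (by name: the statement is the Claim_ definition above) =====
theorem set_plus_format_py_spec : Claim_equal_set_plus_format_py := by
  intro args _ hpre
  obtain ⟨hmem, h1, h2⟩ := hpre
  unfold Spec_set_plus_format_py set_plus_format_py set_plus_format_py_alt
  rw [pass_eq "+" args.length args (le_refl _) hmem h1]
  by_cases hargs : args = []
  · subst hargs
    rw [mergePassB_nil]
    exact pass_eq "-" 0 [] (by simp) (by simp) (by simp)
  · have hp := passB_plus_props args.length args (le_refl _) hargs hmem h1 h2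
    exact pass_eq "-" (mergePassB "+" args).length _ (le_refl _) hp.2.1 hp.2.2
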